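-- pv_equiv track=rewrite | github.com/asashepard/contexttune | context_policy/signals/import_graph.py | _find_local_module
-- ===== SOURCE A (Python) =====
-- def _find_local_module(imported: str, local_modules_set: set[str]) -> str | None:
--     """Find the best matching local module for an import.
--
--     Args:
--         imported: The imported module name (e.g., "pkg.sub").
--         local_modules_set: Set of known local module names.
--
--     Returns:
--         The matching local module name, or None if not local.
--     """
--     # Direct match
--     if imported in local_modules_set:
--         return imported
--
--     # Check if it's a prefix of any local module (e.g., "pkg" when "pkg.sub" exists)
--     for local_mod in local_modules_set:
--         if local_mod.startswith(imported + "."):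
--             return imported
--
--     # Check if any local module is a prefix (e.g., importing "pkg.sub.func" when "pkg.sub" exists)
--     parts = imported.split(".")
--     for i in range(len(parts), 0, -1):
--         prefix = ".".join(parts[:i])
--         if prefix in local_modules_set:
--             return prefix
--
--     return None
-- ===== SOURCE B (Python) =====
-- def _find_local_module(imported: str, local_modules_set: set[str]) -> str | None:
--     """Single pass over local_modules_set: a flag records whether imported is
--     itself local (equal to, or a dot-prefix of, some local module); otherwise
--     keep the longest member that is a dot-prefix of imported."""
--     flag = False
--     best = None
--     for m in local_modules_set:
--         if m == imported or m.startswith(imported + "."):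
--             flag = True
--         elif imported.startswith(m + ".") and (best is None or len(m) > len(best)):
--             best = m
--     return imported if flag else best
-- ===== Notes on version B (the rewrite author's own statement) =====
-- stated objective: alternative
-- what changed: A's three sequential phases (set membership test, a scan for modules extending imported, then generating each dot-prefix of imported from its split parts and looking it up) are replaced by one pass over local_modules_set that keeps a 'local' flag and the longest member that is a dot-prefix of imported.
import Mathlib
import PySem

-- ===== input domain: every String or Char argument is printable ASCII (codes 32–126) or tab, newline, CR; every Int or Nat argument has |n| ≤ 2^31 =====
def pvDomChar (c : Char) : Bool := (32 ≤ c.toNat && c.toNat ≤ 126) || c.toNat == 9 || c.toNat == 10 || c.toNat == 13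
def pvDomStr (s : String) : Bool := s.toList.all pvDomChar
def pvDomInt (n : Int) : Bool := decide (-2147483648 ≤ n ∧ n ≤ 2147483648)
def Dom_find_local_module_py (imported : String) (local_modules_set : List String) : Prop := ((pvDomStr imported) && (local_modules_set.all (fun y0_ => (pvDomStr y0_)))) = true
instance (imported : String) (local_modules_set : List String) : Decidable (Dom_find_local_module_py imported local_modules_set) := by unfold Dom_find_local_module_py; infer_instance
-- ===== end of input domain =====

-- B replaces A's three phases (set lookup, prefix scan, prefix-generation loop with lookups)
-- by a single pass over the set keeping a flag and the longest dot-prefix; objective: alternative decomposition.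

-- ===== PORT A =====
-- for local_mod in local_modules_set: if local_mod.startswith(imported + "."): return imported
def pvAScanPrefix (imported : String) : List String → Option String
  | [] => none
  | m :: rest =>
    if PySem.Str.startswith m (imported ++ ".") then some imported
    else pvAScanPrefix imported rest

-- for i in range(len(parts), 0, -1): prefix = ".".join(parts[:i]); if prefix in local_modules_set: return prefix
def pvAScanParts (local_modules_set : List String) (parts : List String) : List Int → Option String
  | [] => none
  | i :: rest =>
    let pfx := PySem.Str.join "." (PySem.List.slice parts none (some i))
    if PySem.Set.contains local_modules_set pfx then some pfx
    else pvAScanParts local_modules_set parts rest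

def find_local_module_py (imported : String) (local_modules_set : List String) : Option String :=
  if PySem.Set.contains local_modules_set imported then some imported
  else
    match pvAScanPrefix imported local_modules_set with
    | some r => some r
    | none =>
      -- parts = imported.split("."); sep "." is nonempty, so split? never returns none
      let parts := (PySem.Str.split? imported ".").getD []
      pvAScanParts local_modules_set parts (PySem.List.pyRange (parts.length : Int) 0 (-1))

-- ===== PORT B =====
def pvBStep (imported : String) (st : Bool × Option String) (m : String) : Bool × Option String :=
  if m == imported || PySem.Str.startswith m (imported ++ ".") then (true, st.2)
  else
    match st.2 with
    | none =>
      if PySem.Str.startswith imported (m ++ ".") then (st.1, some m) else st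
    | some best =>
      if PySem.Str.startswith imported (m ++ ".") && (PySem.Str.len best < PySem.Str.len m) then (st.1, some m) else st

def find_local_module_py_alt (imported : String) (local_modules_set : List String) : Option String :=
  let r := local_modules_set.foldl (pvBStep imported) (false, none)
  if r.1 then some imported else r.2

-- ===== PRECONDITION & SPEC =====
def Spec_find_local_module_py (imported : String) (local_modules_set : List String) (out : Option String) : Prop := out = find_local_module_py_alt imported local_modules_set
instance (imported : String) (local_modules_set : List String) (out : Option String) : Decidable (Spec_find_local_module_py imported local_modules_set out) := by unfold Spec_find_local_module_py; infer_instance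

-- ===== CLAIM (what is proved, stated in full; the proofs are below) =====
def Claim_equal_find_local_module_py : Prop := ∀ (imported : String) (local_modules_set : List String), Dom_find_local_module_py imported local_modules_set → Spec_find_local_module_py imported local_modules_set (find_local_module_py imported local_modules_set)

-- ===== LEMMAS AND PROOFS =====

-- proof-side reference split of a char list at '.'
def pvSplit : List Char → List (List Char)
  | [] => [[]]
  | c :: t => if c = '.' then [] :: pvSplit t else (pvSplit t).modifyHead (c :: ·)

theorem pvSplit_nil : pvSplit [] = [[]] := rfl

theorem pvSplit_dot (t : List Char) : pvSplit ('.' :: t) = [] :: pvSplit t := by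
  simp [pvSplit]

theorem pvSplit_other (c : Char) (t : List Char) (hc : c ≠ '.') :
    pvSplit (c :: t) = (pvSplit t).modifyHead (c :: ·) := by
  simp [pvSplit, hc]

theorem pvSplit_ne_nil (cs : List Char) : pvSplit cs ≠ [] := by
  cases cs with
  | nil => simp [pvSplit]
  | cons c t =>
    by_cases hc : c = '.'
    · subst hc; rw [pvSplit_dot]; simp
    · rw [pvSplit_other c t hc]
      obtain ⟨h, r, hhr⟩ := List.exists_cons_of_ne_nil (pvSplit_ne_nil t)
      rw [hhr]; simp

theorem pvModifyHead {α : Type} (l : List α) : List.modifyHead (fun x => x) l = l := by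
  cases l <;> rfl

theorem pvSplit_go (fuel : Nat) (l cur : List Char) (acc : List (List Char))
    (h : l.length < fuel) :
    PySem.Chars.splitOn.go ['.'] fuel l cur acc
      = acc.reverse ++ (pvSplit l).modifyHead (cur.reverse ++ ·) := by
  induction fuel generalizing l cur acc with
  | zero => omega
  | succ f ih =>
    cases l with
    | nil =>
      rw [PySem.Chars.splitOn.go]
      · rw [pvSplit_nil]; simp
      · omega
    | cons c rest =>
      rw [PySem.Chars.splitOn.go]
      by_cases hc : c = '.'
      · subst hc
        have hp : List.isPrefixOf ['.'] ('.' :: rest) = true := by simp [List.isPrefixOf]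
        rw [if_pos hp]
        rw [show List.drop (['.'] : List Char).length ('.' :: rest) = rest from rfl]
        rw [ih rest [] (cur.reverse :: acc) (by simp at h; omega)]
        rw [pvSplit_dot]
        simp only [List.reverse_nil, List.nil_append, List.modifyHead_cons, List.append_nil,
          List.reverse_cons, List.append_assoc, List.singleton_append]
        rw [pvModifyHead]
      · have hp : List.isPrefixOf ['.'] (c :: rest) = false := by
          simp [List.isPrefixOf]
          exact fun h' => absurd h'.symm hc
        rw [if_neg (by simp [hp])]
        rw [ih rest (c :: cur) acc (by simp at h; omega)]
        rw [pvSplit_other c rest hc, List.modifyHead_modifyHead]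
        congr 2
        funext x
        simp

theorem pvSplit_eq_splitOn (cs : List Char) : PySem.Chars.splitOn cs ['.'] = pvSplit cs := by
  have h0 : PySem.Chars.splitOn cs ['.'] = PySem.Chars.splitOn.go ['.'] (cs.length + 1) cs [] [] := rfl
  rw [h0, pvSplit_go (cs.length + 1) cs [] [] (by omega)]
  simp only [List.reverse_nil, List.nil_append]
  exact pvModifyHead _

theorem pvJoin_pvSplit (cs : List Char) : PySem.Chars.join ['.'] (pvSplit cs) = cs := by
  induction cs with
  | nil => rw [pvSplit_nil, PySem.Chars.join_singleton]
  | cons c t ih =>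
    obtain ⟨h, r, hhr⟩ := List.exists_cons_of_ne_nil (pvSplit_ne_nil t)
    by_cases hc : c = '.'
    · subst hc
      rw [pvSplit_dot, hhr, PySem.Chars.join_cons_cons, ← hhr, ih]
      simp
    · rw [pvSplit_other c t hc, hhr, List.modifyHead_cons]
      cases r with
      | nil =>
        rw [PySem.Chars.join_singleton]
        have h2 := ih
        rw [hhr, PySem.Chars.join_singleton] at h2
        rw [h2]
      | cons p q =>
        rw [PySem.Chars.join_cons_cons]
        have h2 := ih
        rw [hhr, PySem.Chars.join_cons_cons] at h2
        rw [show (c :: h) ++ ['.'] ++ PySem.Chars.join ['.'] (p :: q)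
              = c :: (h ++ ['.'] ++ PySem.Chars.join ['.'] (p :: q)) from by simp, h2]

-- join over a nonempty list extended by one part
theorem pvJoin_append_singleton (A : List (List Char)) (x : List Char) (h : A ≠ []) :
    PySem.Chars.join ['.'] (A ++ [x]) = PySem.Chars.join ['.'] A ++ '.' :: x := by
  induction A with
  | nil => exact absurd rfl h
  | cons a A' ih =>
    cases A' with
    | nil =>
      rw [List.cons_append, List.nil_append, PySem.Chars.join_cons_cons,
          PySem.Chars.join_singleton, PySem.Chars.join_singleton]
      simp
    | cons b B =>
      rw [show (a :: b :: B) ++ [x] = a :: (b :: (B ++ [x])) from by simp]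
      rw [PySem.Chars.join_cons_cons]
      have ih' := ih (by simp)
      rw [List.cons_append] at ih'
      rw [ih', PySem.Chars.join_cons_cons]
      simp

-- join over a list whose head gains a character
theorem pvJoin_take_cons (h : List Char) (r : List (List Char)) (c : Char) (k : Nat) (hk : 1 ≤ k) :
    PySem.Chars.join ['.'] (((c :: h) :: r).take k) = c :: PySem.Chars.join ['.'] ((h :: r).take k) := by
  obtain ⟨k', rfl⟩ : ∃ k', k = k' + 1 := ⟨k - 1, by omega⟩
  simp only [List.take_succ_cons]
  cases hr : r.take k' with
  | nil => rw [PySem.Chars.join_singleton, PySem.Chars.join_singleton]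
  | cons p q =>
    rw [PySem.Chars.join_cons_cons, PySem.Chars.join_cons_cons]
    simp

theorem pvJoin_take_nilcons (ps : List (List Char)) (hps : ps ≠ []) (k : Nat) (hk : 1 ≤ k) :
    PySem.Chars.join ['.'] (([] :: ps).take (k + 1)) = '.' :: PySem.Chars.join ['.'] (ps.take k) := by
  obtain ⟨h, r, rfl⟩ := List.exists_cons_of_ne_nil hps
  obtain ⟨k', rfl⟩ : ∃ k', k = k' + 1 := ⟨k - 1, by omega⟩
  simp only [List.take_succ_cons]
  rw [PySem.Chars.join_cons_cons]
  simp

-- every proper dot-boundary prefix: 1 ≤ k < (pvSplit cs).length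
theorem pvTake_isDotPrefix (cs : List Char) (k : Nat) (h1 : 1 ≤ k) (h2 : k < (pvSplit cs).length) :
    PySem.Chars.join ['.'] ((pvSplit cs).take k) ++ ['.'] <+: cs := by
  induction cs generalizing k with
  | nil => rw [pvSplit_nil] at h2; simp at h2; omega
  | cons c t ih =>
    by_cases hc : c = '.'
    · subst hc
      rw [pvSplit_dot] at h2 ⊢
      obtain ⟨k', rfl⟩ : ∃ k', k = k' + 1 := ⟨k - 1, by omega⟩
      cases Nat.eq_zero_or_pos k' with
      | inl hz =>
        subst hz
        rw [List.take_succ_cons, List.take_zero, PySem.Chars.join_singleton]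
        exact ⟨t, rfl⟩
      | inr hpos =>
        rw [pvJoin_take_nilcons (pvSplit t) (pvSplit_ne_nil t) k' hpos,
            List.cons_append, List.cons_prefix_cons]
        refine ⟨rfl, ih k' hpos ?_⟩
        simp at h2; omega
    · obtain ⟨h, r, hhr⟩ := List.exists_cons_of_ne_nil (pvSplit_ne_nil t)
      rw [pvSplit_other c t hc, hhr, List.modifyHead_cons] at h2 ⊢
      rw [pvJoin_take_cons h r c k h1, List.cons_append, List.cons_prefix_cons]
      refine ⟨rfl, ?_⟩
      have hlt : k < (pvSplit t).length := by rw [hhr]; simp at h2 ⊢; omega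
      have := ih k h1 hlt
      rwa [hhr] at this

theorem pvDotPrefix_eq_take (cs : List Char) (m : List Char) (h : m ++ ['.'] <+: cs) :
    ∃ k, 1 ≤ k ∧ k < (pvSplit cs).length ∧ m = PySem.Chars.join ['.'] ((pvSplit cs).take k) := by
  induction cs generalizing m with
  | nil =>
    exfalso
    have := h.length_le
    simp at this
  | cons c t ih =>
    cases m with
    | nil =>
      rw [List.nil_append, List.cons_prefix_cons] at h
      obtain ⟨rfl, -⟩ : '.' = c ∧ _ := h
      refine ⟨1, le_refl 1, ?_, ?_⟩
      · rw [pvSplit_dot]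
        have := List.length_pos_of_ne_nil (pvSplit_ne_nil t)
        simp; omega
      · rw [pvSplit_dot, List.take_succ_cons, List.take_zero, PySem.Chars.join_singleton]
    | cons a m' =>
      rw [List.cons_append, List.cons_prefix_cons] at h
      obtain ⟨rfl, h'⟩ := h
      obtain ⟨k, hk1, hk2, hk3⟩ := ih m' h'
      by_cases hc : a = '.'
      · subst hc
        refine ⟨k + 1, by omega, ?_, ?_⟩
        · rw [pvSplit_dot]; simp; omega
        · rw [pvSplit_dot, pvJoin_take_nilcons (pvSplit t) (pvSplit_ne_nil t) k hk1, hk3]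
      · obtain ⟨h0, r, hhr⟩ := List.exists_cons_of_ne_nil (pvSplit_ne_nil t)
        refine ⟨k, hk1, ?_, ?_⟩
        · rw [pvSplit_other a t hc, hhr, List.modifyHead_cons]
          rw [hhr] at hk2; simpa using hk2
        · rw [pvSplit_other a t hc, hhr, List.modifyHead_cons]
          rw [pvJoin_take_cons h0 r a k hk1, ← hhr, ← hk3]

theorem pvJoin_take_len_lt (cs : List Char) (k l : Nat) (h1 : 1 ≤ k) (h2 : k < l)
    (h3 : l ≤ (pvSplit cs).length) :
    (PySem.Chars.join ['.'] ((pvSplit cs).take k)).length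
      < (PySem.Chars.join ['.'] ((pvSplit cs).take l)).length := by
  have step : ∀ k, 1 ≤ k → k < (pvSplit cs).length →
      (PySem.Chars.join ['.'] ((pvSplit cs).take k)).length
        < (PySem.Chars.join ['.'] ((pvSplit cs).take (k + 1))).length := by
    intro k hk1 hk2
    have hget : (pvSplit cs)[k]?.toList = [(pvSplit cs)[k]] := by
      rw [List.getElem?_eq_getElem hk2]; rfl
    rw [List.take_succ, hget]
    rw [pvJoin_append_singleton _ _ (by
      rw [Ne, List.take_eq_nil_iff]
      push_neg
      exact ⟨by omega, pvSplit_ne_nil cs⟩)]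
    simp
  induction l with
  | zero => omega
  | succ l' ihl =>
    rcases Nat.lt_or_ge k l' with hlt | hge
    · exact lt_trans (ihl hlt (by omega)) (step l' (by omega) (by omega))
    · have hkl : k = l' := by omega
      subst hkl
      exact step k h1 (by omega)

-- B-side loop characterisation
def pvG (s : String) (o : Option String) (m : String) : Option String :=
  match o with
  | none => if PySem.Str.startswith s (m ++ ".") then some m else none
  | some best =>
    if PySem.Str.startswith s (m ++ ".") && (PySem.Str.len best < PySem.Str.len m) then some m else some best

theorem pvG_none_eq (s m : String) :
    pvG s none m = if PySem.Str.startswith s (m ++ ".") then some m else none := rfl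

theorem pvG_some_eq (s best m : String) :
    pvG s (some best) m
      = if PySem.Str.startswith s (m ++ ".") && (PySem.Str.len best < PySem.Str.len m)
        then some m else some best := rfl

theorem pvBStep_hit (s m : String) (b : Bool) (o : Option String)
    (h : (m == s || PySem.Str.startswith m (s ++ ".")) = true) :
    pvBStep s (b, o) m = (true, o) := by
  simp only [pvBStep]
  rw [if_pos h]

theorem pvBStep_miss (s m : String) (b : Bool) (o : Option String)
    (h : (m == s || PySem.Str.startswith m (s ++ ".")) = false) :
    pvBStep s (b, o) m = (b, pvG s o m) := by
  cases o <;>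
    (simp only [pvBStep, pvG]
     rw [if_neg (by rw [h]; exact Bool.false_ne_true)]
     split_ifs <;> rfl)

theorem pvFold_fst (s : String) (S : List String) (b : Bool) (o : Option String) :
    (S.foldl (pvBStep s) (b, o)).1
      = (b || S.any (fun m => m == s || PySem.Str.startswith m (s ++ "."))) := by
  induction S generalizing b o with
  | nil => simp
  | cons m rest ih =>
    simp only [List.foldl_cons, List.any_cons]
    by_cases h : (m == s || PySem.Str.startswith m (s ++ ".")) = true
    · rw [pvBStep_hit s m b o h, ih, h]
      simp
    · have h' : (m == s || PySem.Str.startswith m (s ++ ".")) = false := by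
        rwa [Bool.not_eq_true] at h
      rw [pvBStep_miss s m b o h', ih, h']
      simp

theorem pvFold_snd (s : String) (S : List String) (b : Bool) (o : Option String)
    (h : ∀ m ∈ S, (m == s || PySem.Str.startswith m (s ++ ".")) = false) :
    (S.foldl (pvBStep s) (b, o)).2 = S.foldl (pvG s) o := by
  induction S generalizing o with
  | nil => rfl
  | cons m rest ih =>
    simp only [List.foldl_cons]
    rw [pvBStep_miss s m b o (h m (by simp))]
    exact ih (pvG s o m) (fun m' hm' => h m' (by simp [hm']))

theorem pvG_none (s : String) (S : List String) (o : Option String)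
    (h : S.foldl (pvG s) o = none) :
    o = none ∧ ∀ m ∈ S, PySem.Str.startswith s (m ++ ".") = false := by
  induction S generalizing o with
  | nil => exact ⟨h, by simp⟩
  | cons m rest ih =>
    simp only [List.foldl_cons] at h
    obtain ⟨h1, h2⟩ := ih (pvG s o m) h
    cases o with
    | some best =>
      exfalso
      rw [pvG_some_eq] at h1
      by_cases hcond : (PySem.Str.startswith s (m ++ ".")
          && (PySem.Str.len best < PySem.Str.len m)) = true
      · rw [if_pos hcond] at h1; exact absurd h1 (by simp)
      · rw [if_neg hcond] at h1; exact absurd h1 (by simp)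
    | none =>
      refine ⟨rfl, ?_⟩
      intro m' hm'
      rcases List.mem_cons.mp hm' with rfl | hm''
      · rw [pvG_none_eq] at h1
        by_cases hcond : PySem.Str.startswith s (m' ++ ".") = true
        · rw [if_pos hcond] at h1; exact absurd h1 (by simp)
        · rwa [Bool.not_eq_true] at hcond
      · exact h2 m' hm''

theorem pvG_some (s : String) (S : List String) (o : Option String) (m0 : String)
    (h : S.foldl (pvG s) o = some m0)
    (ho : ∀ b, o = some b → PySem.Str.startswith s (b ++ ".") = true) :
    PySem.Str.startswith s (m0 ++ ".") = true ∧ (m0 ∈ S ∨ o = some m0)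
      ∧ (∀ m' ∈ S, PySem.Str.startswith s (m' ++ ".") = true → m'.toList.length ≤ m0.toList.length)
      ∧ (∀ b, o = some b → b.toList.length ≤ m0.toList.length) := by
  induction S generalizing o with
  | nil =>
    simp only [List.foldl_nil] at h
    subst h
    exact ⟨ho m0 rfl, Or.inr rfl, by simp, fun b hb => by rw [Option.some.inj hb]⟩
  | cons m rest ih =>
    simp only [List.foldl_cons] at h
    have ho' : ∀ b, pvG s o m = some b → PySem.Str.startswith s (b ++ ".") = true := by
      intro b hb
      cases o with
      | none =>
        rw [pvG_none_eq] at hb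
        by_cases hcond : PySem.Str.startswith s (m ++ ".") = true
        · rw [if_pos hcond] at hb
          rw [← Option.some.inj hb]
          exact hcond
        · rw [if_neg hcond] at hb
          exact absurd hb (by simp)
      | some best =>
        rw [pvG_some_eq] at hb
        by_cases hcond : (PySem.Str.startswith s (m ++ ".")
            && (PySem.Str.len best < PySem.Str.len m)) = true
        · rw [if_pos hcond] at hb
          rw [← Option.some.inj hb]
          simp only [Bool.and_eq_true] at hcond
          exact hcond.1
        · rw [if_neg hcond] at hb
          rw [← Option.some.inj hb]
          exact ho best rfl
    obtain ⟨H1, H2, H3, H4⟩ := ih (pvG s o m) h ho'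
    refine ⟨H1, ?_, ?_, ?_⟩
    · rcases H2 with hmr | hsome
      · exact Or.inl (List.mem_cons_of_mem m hmr)
      · cases o with
        | none =>
          rw [pvG_none_eq] at hsome
          by_cases hcond : PySem.Str.startswith s (m ++ ".") = true
          · rw [if_pos hcond] at hsome
            exact Or.inl (by rw [← Option.some.inj hsome]; exact List.mem_cons_self)
          · rw [if_neg hcond] at hsome
            exact absurd hsome (by simp)
        | some best =>
          rw [pvG_some_eq] at hsome
          by_cases hcond : (PySem.Str.startswith s (m ++ ".")
              && (PySem.Str.len best < PySem.Str.len m)) = true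
          · rw [if_pos hcond] at hsome
            exact Or.inl (by rw [← Option.some.inj hsome]; exact List.mem_cons_self)
          · rw [if_neg hcond] at hsome
            exact Or.inr (by rw [← Option.some.inj hsome])
    · intro m' hm' hc'
      rcases List.mem_cons.mp hm' with rfl | hm''
      · cases o with
        | none =>
          have hpg : pvG s none m' = some m' := by rw [pvG_none_eq, if_pos hc']
          exact H4 m' hpg
        | some best =>
          by_cases hl : PySem.Str.len best < PySem.Str.len m'
          · have hpg : pvG s (some best) m' = some m' := by
              rw [pvG_some_eq, if_pos (by rw [hc']; simpa using hl)]
            exact H4 m' hpg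
          · have hle : m'.toList.length ≤ best.toList.length := by
              simp only [PySem.Str.len] at hl; omega
            have hpg : pvG s (some best) m' = some best := by
              rw [pvG_some_eq, if_neg (by
                simp only [Bool.and_eq_true, decide_eq_true_eq]
                intro hcontra
                exact hl hcontra.2)]
            exact le_trans hle (H4 best hpg)
      · exact H3 m' hm'' hc'
    · intro b hb
      subst hb
      by_cases hcond : (PySem.Str.startswith s (m ++ ".")
          && (PySem.Str.len b < PySem.Str.len m)) = true
      · have hpg : pvG s (some b) m = some m := by rw [pvG_some_eq, if_pos hcond]
        have hw := H4 m hpg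
        simp only [Bool.and_eq_true, decide_eq_true_eq] at hcond
        have hlen := hcond.2
        simp only [PySem.Str.len] at hlen
        omega
      · have hpg : pvG s (some b) m = some b := by rw [pvG_some_eq, if_neg hcond]
        exact H4 b hpg

-- A-side loop characterisations
theorem pvAScanPrefix_none_iff (s : String) (S : List String) :
    pvAScanPrefix s S = none ↔ ∀ m ∈ S, PySem.Str.startswith m (s ++ ".") = false := by
  induction S with
  | nil => simp [pvAScanPrefix]
  | cons m rest ih =>
    simp only [pvAScanPrefix]
    by_cases hcase : PySem.Str.startswith m (s ++ ".") = true
    · rw [if_pos hcase]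
      constructor
      · intro hx; exact absurd hx (by simp)
      · intro hall
        have h0 := hall m List.mem_cons_self
        rw [h0] at hcase
        exact Bool.noConfusion hcase
    · have h' : PySem.Str.startswith m (s ++ ".") = false := by rwa [Bool.not_eq_true] at hcase
      rw [if_neg hcase, ih]
      constructor
      · intro hall m' hm'
        rcases List.mem_cons.mp hm' with rfl | hm''
        · exact h'
        · exact hall m' hm''
      · intro hall m' hm'
        exact hall m' (List.mem_cons_of_mem m hm')

theorem pvAScanPrefix_eq_some (s : String) (S : List String) (r : String)
    (h : pvAScanPrefix s S = some r) : r = s := by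
  induction S with
  | nil => simp [pvAScanPrefix] at h
  | cons m rest ih =>
    simp only [pvAScanPrefix] at h
    split at h
    · exact (Option.some.inj h).symm
    · exact ih h

theorem pvAScanParts_none (S parts : List String) (L : List Int)
    (h : ∀ i ∈ L, PySem.Set.contains S (PySem.Str.join "." (PySem.List.slice parts none (some i))) = false) :
    pvAScanParts S parts L = none := by
  induction L with
  | nil => rfl
  | cons i rest ih =>
    simp only [pvAScanParts]
    rw [h i List.mem_cons_self]
    simp only [Bool.false_eq_true, if_false]
    exact ih (fun j hj => h j (List.mem_cons_of_mem i hj))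

theorem pvAScanParts_first (S parts : List String) (L : List Int) (hL : L.Pairwise (· > ·))
    (i0 : Int) (hi : i0 ∈ L)
    (hmem : PySem.Set.contains S (PySem.Str.join "." (PySem.List.slice parts none (some i0))) = true)
    (hno : ∀ j ∈ L, i0 < j → PySem.Set.contains S (PySem.Str.join "." (PySem.List.slice parts none (some j))) = false) :
    pvAScanParts S parts L = some (PySem.Str.join "." (PySem.List.slice parts none (some i0))) := by
  induction L with
  | nil => simp at hi
  | cons i rest ih =>
    rcases List.mem_cons.mp hi with rfl | hi'
    · simp only [pvAScanParts]
      rw [hmem]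
      simp
    · have hgt : i0 < i := (List.pairwise_cons.mp hL).1 i0 hi'
      have hfalse := hno i List.mem_cons_self hgt
      simp only [pvAScanParts]
      rw [hfalse]
      simp only [Bool.false_eq_true, if_false]
      exact ih (List.pairwise_cons.mp hL).2 hi'
        (fun j hj hlt => hno j (List.mem_cons_of_mem i hj) hlt)

-- bridges between the String-level ports and the char-level lemmas
theorem pvDotList : (".":String).toList = ['.'] := by decide

theorem pvCond2_iff (s m : String) :
    PySem.Str.startswith s (m ++ ".") = true ↔ m.toList ++ ['.'] <+: s.toList := by
  rw [PySem.Str.startswith_eq, PySem.Chars.startswith_iff, String.toList_append, pvDotList]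

theorem pvParts_eq (s : String) :
    (PySem.Str.split? s ".").getD [] = (pvSplit s.toList).map String.ofList := by
  unfold PySem.Str.split? PySem.Chars.split?
  rw [pvDotList]
  simp [pvSplit_eq_splitOn]

theorem pvPfx_toList (s : String) (i : Int) (h0 : 0 ≤ i) :
    (PySem.Str.join "." (PySem.List.slice ((pvSplit s.toList).map String.ofList) none (some i))).toList
      = PySem.Chars.join ['.'] ((pvSplit s.toList).take i.toNat) := by
  rw [PySem.List.slice_to _ h0, ← List.map_take, PySem.Str.toList_join, pvDotList, List.map_map]
  congr 1
  simp [Function.comp_def]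

-- ===== VERDICT (by name: the statement is the Claim_ definition above) =====
theorem find_local_module_py_spec : Claim_equal_find_local_module_py := by
  intro s S _
  unfold Spec_find_local_module_py
  have hBeq : find_local_module_py_alt s S
      = (if (S.foldl (pvBStep s) (false, none)).1 = true then some s
         else (S.foldl (pvBStep s) (false, none)).2) := rfl
  by_cases hany : S.any (fun m => m == s || PySem.Str.startswith m (s ++ ".")) = true
  · -- B returns some s; so does A
    rw [hBeq, pvFold_fst s S false none, Bool.false_or, hany, if_pos rfl]
    unfold find_local_module_py
    by_cases hmem : PySem.Set.contains S s = true
    · rw [if_pos hmem]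
    · rw [if_neg hmem]
      obtain ⟨m, hmS, hm⟩ := List.any_eq_true.mp hany
      have hmne : (m == s) = false := by
        rw [Bool.eq_false_iff]
        intro hc
        exact hmem (((PySem.Set.contains_iff S s).mpr (beq_iff_eq.mp hc ▸ hmS)))
      have hsw : PySem.Str.startswith m (s ++ ".") = true := by
        rw [hmne] at hm
        simpa using hm
      cases hscan : pvAScanPrefix s S with
      | none =>
        rw [pvAScanPrefix_none_iff] at hscan
        rw [hscan m hmS] at hsw
        exact absurd hsw (by simp)
      | some r =>
        have hr := pvAScanPrefix_eq_some s S r hscan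
        subst hr
        rfl
  · -- nothing marks s local: both sides return the longest dot-prefix member
    have hanyf : S.any (fun m => m == s || PySem.Str.startswith m (s ++ ".")) = false := by
      rwa [Bool.not_eq_true] at hany
    have hall : ∀ m ∈ S, (m == s || PySem.Str.startswith m (s ++ ".")) = false := by
      intro m hm
      rw [Bool.eq_false_iff]
      intro hc
      rw [List.any_eq_true.mpr ⟨m, hm, hc⟩] at hanyf
      exact absurd hanyf (by simp)
    have hsnot : s ∉ S := by
      intro hs
      have hc := hall s hs
      simp at hc
    have hmem : PySem.Set.contains S s = false := by
      rw [Bool.eq_false_iff]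
      intro hc
      exact hsnot ((PySem.Set.contains_iff S s).mp hc)
    have hscan : pvAScanPrefix s S = none := (pvAScanPrefix_none_iff s S).mpr (fun m hm => by
      have hc := hall m hm
      simp only [Bool.or_eq_false_iff] at hc
      exact hc.2)
    have hAeq : find_local_module_py s S
        = pvAScanParts S ((PySem.Str.split? s ".").getD [])
            (PySem.List.pyRange ((((PySem.Str.split? s ".").getD []).length : Nat) : Int) 0 (-1)) := by
      unfold find_local_module_py
      rw [if_neg (by rw [hmem]; exact Bool.false_ne_true), hscan]
    rw [hBeq, pvFold_fst s S false none, Bool.false_or, hanyf,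
        if_neg (by exact Bool.false_ne_true), pvFold_snd s S false none hall, hAeq,
        pvParts_eq, List.length_map]
    cases hG : S.foldl (pvG s) none with
    | none =>
      obtain ⟨-, hno2⟩ := pvG_none s S none hG
      apply pvAScanParts_none
      intro i hi
      rw [Bool.eq_false_iff]
      intro hc
      obtain ⟨hipos, hile⟩ := PySem.List.mem_pyRange_neg_one.mp hi
      have hkb : i.toNat ≤ (pvSplit s.toList).length := by omega
      have hmemS := (PySem.Set.contains_iff S _).mp hc
      by_cases hkn : i.toNat = (pvSplit s.toList).length
      · have hfx : PySem.Str.join "." (PySem.List.slice ((pvSplit s.toList).map String.ofList)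
            none (some i)) = s := by
          rw [← String.toList_inj, pvPfx_toList s i (by omega), hkn, List.take_length,
            pvJoin_pvSplit]
        rw [hfx] at hmemS
        exact hsnot hmemS
      · have hklt : i.toNat < (pvSplit s.toList).length := lt_of_le_of_ne hkb hkn
        have hdp := pvTake_isDotPrefix s.toList i.toNat (by omega) hklt
        have hc2 : PySem.Str.startswith s ((PySem.Str.join "."
            (PySem.List.slice ((pvSplit s.toList).map String.ofList) none (some i))) ++ ".") = true := by
          rw [pvCond2_iff, pvPfx_toList s i (by omega)]
          exact hdp
        rw [hno2 _ hmemS] at hc2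
        exact absurd hc2 (by simp)
    | some m0 =>
      obtain ⟨H1, H2, H3, -⟩ := pvG_some s S none m0 hG (fun b hb => absurd hb (by simp))
      have hm0S : m0 ∈ S := H2.resolve_right (by simp)
      have hdp0 : m0.toList ++ ['.'] <+: s.toList := (pvCond2_iff s m0).mp H1
      obtain ⟨k, hk1, hk2, hk3⟩ := pvDotPrefix_eq_take s.toList m0.toList hdp0
      have hpfx : PySem.Str.join "." (PySem.List.slice ((pvSplit s.toList).map String.ofList)
          none (some (k : Int))) = m0 := by
        rw [← String.toList_inj, pvPfx_toList s (k : Int) (by omega), Int.toNat_natCast]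
        exact hk3.symm
      have hpair : (PySem.List.pyRange ((pvSplit s.toList).length : Int) 0 (-1)).Pairwise (· > ·) := by
        rw [PySem.List.pyRange_neg_one_eq_reverse, List.pairwise_reverse]
        exact PySem.List.pairwise_lt_pyRange_one _ _
      have hkmem : (k : Int) ∈ PySem.List.pyRange ((pvSplit s.toList).length : Int) 0 (-1) :=
        PySem.List.mem_pyRange_neg_one.mpr ⟨by exact_mod_cast hk1, by exact_mod_cast le_of_lt hk2⟩
      have hmemtrue : PySem.Set.contains S (PySem.Str.join "."
          (PySem.List.slice ((pvSplit s.toList).map String.ofList) none (some (k : Int)))) = true := by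
        rw [hpfx]
        exact (PySem.Set.contains_iff S m0).mpr hm0S
      have hno3 : ∀ j ∈ PySem.List.pyRange ((pvSplit s.toList).length : Int) 0 (-1), (k : Int) < j →
          PySem.Set.contains S (PySem.Str.join "."
            (PySem.List.slice ((pvSplit s.toList).map String.ofList) none (some j))) = false := by
        intro j hj hlt
        rw [Bool.eq_false_iff]
        intro hc
        obtain ⟨hjpos, hjle⟩ := PySem.List.mem_pyRange_neg_one.mp hj
        have hjS := (PySem.Set.contains_iff S _).mp hc
        by_cases hjn : j.toNat = (pvSplit s.toList).length
        · have hfx : PySem.Str.join "." (PySem.List.slice ((pvSplit s.toList).map String.ofList)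
              none (some j)) = s := by
            rw [← String.toList_inj, pvPfx_toList s j (by omega), hjn, List.take_length,
              pvJoin_pvSplit]
          rw [hfx] at hjS
          exact hsnot hjS
        · have hjlt : j.toNat < (pvSplit s.toList).length := by
            have : j.toNat ≤ (pvSplit s.toList).length := by omega
            omega
          have hdpj := pvTake_isDotPrefix s.toList j.toNat (by omega) hjlt
          have hcond2j : PySem.Str.startswith s ((PySem.Str.join "."
              (PySem.List.slice ((pvSplit s.toList).map String.ofList) none (some j))) ++ ".") = true := by
            rw [pvCond2_iff, pvPfx_toList s j (by omega)]
            exact hdpj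
          have hlej := H3 _ hjS hcond2j
          have hlt2 := pvJoin_take_len_lt s.toList k j.toNat hk1 (by omega) (by omega)
          rw [pvPfx_toList s j (by omega), hk3] at hlej
          omega
      rw [pvAScanParts_first S ((pvSplit s.toList).map String.ofList) _ hpair (k : Int) hkmem
        hmemtrue hno3, hpfx]
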